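-- pv_equiv track=rewrite | github.com/theBappy/python-fundamentals-with-projects | password_projects/meter_pass.py | consecutiveLowerCase
-- ===== SOURCE A (Python) =====
-- acentos = "áéíóúàèìòùäëïöüâêîôûñç"
--
-- def consecutiveLowerCase(password):
--     countLowerCase = 0
--     password += "1"  # avoid index error
--     for i in range(len(password) - 1):
--         if (
--             password[i].islower()
--             and password[i + 1].islower()
--             and password[i + 1] not in acentos
--             and password[i] not in acentos
--         ):
--             countLowerCase += 1
--     return countLowerCase * (-2)
-- ===== SOURCE B (Python) =====
-- acentos = "áéíóúàèìòùäëïöüâêîôûñç"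
--
--
-- def consecutiveLowerCase(password):
--     # Run-length decomposition: a maximal run of L valid (lowercase,
--     # non-accent) characters contains exactly L-1 adjacent valid pairs.
--     def valid(c):
--         return c.islower() and c not in acentos
--
--     pairs = 0
--     i, n = 0, len(password)
--     while i < n:
--         if valid(password[i]):
--             j = i + 1
--             while j < n and valid(password[j]):
--                 j += 1
--             pairs += j - i - 1
--             i = j
--         else:
--             i += 1
--     return pairs * (-2)
-- ===== Notes on version B (the rewrite author's own statement) =====
-- stated objective: alternative
-- what changed: Replaces A's pairwise adjacency scan over indices (with a sentinel '1' appended to dodge an index error) with a run-length scan: each maximal run of L valid lowercase characters contributes L-1 pairs, summed and scaled by -2.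
import Mathlib
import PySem

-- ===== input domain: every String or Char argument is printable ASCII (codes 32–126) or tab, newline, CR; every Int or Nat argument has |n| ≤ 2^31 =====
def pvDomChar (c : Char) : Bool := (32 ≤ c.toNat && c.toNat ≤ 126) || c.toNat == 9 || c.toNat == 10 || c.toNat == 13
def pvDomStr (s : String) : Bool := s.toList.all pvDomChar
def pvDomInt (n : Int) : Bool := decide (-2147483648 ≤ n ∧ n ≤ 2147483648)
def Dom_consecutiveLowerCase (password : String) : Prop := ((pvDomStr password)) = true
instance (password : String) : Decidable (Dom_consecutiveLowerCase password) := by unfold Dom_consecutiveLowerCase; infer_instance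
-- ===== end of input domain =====

-- B replaces A's pairwise index scan (with appended sentinel '1') by a run-length scan:
-- each maximal run of L valid lowercase characters contributes L-1 pairs; alternative decomposition, same cost.


-- ===== PORT A =====
-- acentos = "áéíóúàèìòùäëïöüâêîôûñç"  (membership of a 1-char string in it = char membership in its char list)
def pvAcentos : List Char := "áéíóúàèìòùäëïöüâêîôûñç".toList

def consecutiveLowerCase (password : String) : Int :=
  -- password += "1"  (worked on the char list; indices are always in range, pyGetD default is never read)
  let cs : List Char := password.toList ++ ['1']
  (PySem.List.pyRange 0 ((cs.length : Int) - 1) 1).foldl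
    (fun countLowerCase i =>
      if PySem.Chars.islower (PySem.List.pyGetD cs i ' ')
          && PySem.Chars.islower (PySem.List.pyGetD cs (i + 1) ' ')
          && !(pvAcentos.contains (PySem.List.pyGetD cs (i + 1) ' '))
          && !(pvAcentos.contains (PySem.List.pyGetD cs i ' '))
      then countLowerCase + 1 else countLowerCase)
    0 * (-2)

-- ===== PORT B =====
def pvValid (c : Char) : Bool := PySem.Chars.islower c && !(pvAcentos.contains c)

-- the outer while-loop of Source B: at a valid char, the inner while advances past the run
-- (takeWhile/dropWhile = the inner scan), adding run_length - 1 pairs; else step one char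
def pvRuns : List Char → Int
  | [] => 0
  | c :: rest =>
    if pvValid c then
      ((rest.takeWhile pvValid).length : Int) + pvRuns (rest.dropWhile pvValid)
    else pvRuns rest
termination_by cs => cs.length
decreasing_by
  · have := List.length_dropWhile_le (p := pvValid) (l := rest); simp; omega
  · simp

def consecutiveLowerCase_alt (password : String) : Int :=
  pvRuns password.toList * (-2)

-- ===== PRECONDITION & SPEC =====
def Spec_consecutiveLowerCase (password : String) (out : Int) : Prop := out = consecutiveLowerCase_alt password
instance (password : String) (out : Int) : Decidable (Spec_consecutiveLowerCase password out) := by unfold Spec_consecutiveLowerCase; infer_instance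

-- ===== CLAIM (what is proved, stated in full; the proofs are below) =====
def Claim_equal_consecutiveLowerCase : Prop := ∀ (password : String), Dom_consecutiveLowerCase password → Spec_consecutiveLowerCase password (consecutiveLowerCase password)

-- ===== LEMMAS AND PROOFS =====

-- number of adjacent valid pairs, as a structural recursion (proof-side characterisation of A's loop)
def pvPairCnt : List Char → Int
  | a :: b :: t => (if pvValid a && pvValid b then 1 else 0) + pvPairCnt (b :: t)
  | _ => 0

lemma pvPairCnt_append_one (cs : List Char) :
    pvPairCnt (cs ++ ['1']) = pvPairCnt cs := by
  induction cs with
  | nil => simp [pvPairCnt]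
  | cons a t ih =>
    cases t with
    | nil => simp [pvPairCnt, show pvValid '1' = false from by decide]
    | cons b t' => simp [pvPairCnt] at ih ⊢; omega

lemma pvFoldl_eq_pairCnt (cs : List Char) (a : Int) :
    (cs.zip cs.tail).foldl
      (fun acc p => if pvValid p.1 && pvValid p.2 then acc + 1 else acc) a
      = a + pvPairCnt cs := by
  induction cs generalizing a with
  | nil => simp [pvPairCnt]
  | cons x t ih =>
    cases t with
    | nil => simp [pvPairCnt]
    | cons y t' =>
      have h := ih (if pvValid x && pvValid y then a + 1 else a)
      simp only [List.tail_cons] at h ⊢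
      simp only [List.zip_cons_cons, List.foldl_cons, h, pvPairCnt]
      split <;> ring

lemma pvCond_eq (a b : Char) :
    (PySem.Chars.islower a && PySem.Chars.islower b
      && !(pvAcentos.contains b) && !(pvAcentos.contains a))
    = (pvValid a && pvValid b) := by
  simp only [pvValid]
  generalize PySem.Chars.islower a = p
  generalize PySem.Chars.islower b = q
  generalize pvAcentos.contains a = r
  generalize pvAcentos.contains b = s
  cases p <;> cases q <;> cases r <;> cases s <;> rfl

lemma pvA_loop_eq (cs : List Char) :
    (PySem.List.pyRange 0 ((cs.length : Int) - 1) 1).foldl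
      (fun countLowerCase i =>
        if PySem.Chars.islower (PySem.List.pyGetD cs i ' ')
            && PySem.Chars.islower (PySem.List.pyGetD cs (i + 1) ' ')
            && !(pvAcentos.contains (PySem.List.pyGetD cs (i + 1) ' '))
            && !(pvAcentos.contains (PySem.List.pyGetD cs i ' '))
        then countLowerCase + 1 else countLowerCase) 0
    = pvPairCnt cs := by
  cases cs with
  | nil => rfl
  | cons x t =>
    have hlen : (((x :: t).length : Int) - 1) = (((x :: t).zip (x :: t).tail).length : Int) := by
      simp
    rw [hlen]
    have hcongr : ∀ (acc : Int) (i : Int), i ∈ PySem.List.pyRange 0 ((((x :: t).zip (x :: t).tail).length : Int)) 1 →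
        (if PySem.Chars.islower (PySem.List.pyGetD (x :: t) i ' ')
            && PySem.Chars.islower (PySem.List.pyGetD (x :: t) (i + 1) ' ')
            && !(pvAcentos.contains (PySem.List.pyGetD (x :: t) (i + 1) ' '))
            && !(pvAcentos.contains (PySem.List.pyGetD (x :: t) i ' '))
         then acc + 1 else acc)
        = (if pvValid (PySem.List.pyGetD ((x :: t).zip (x :: t).tail) i (' ', ' ')).1
              && pvValid (PySem.List.pyGetD ((x :: t).zip (x :: t).tail) i (' ', ' ')).2
           then acc + 1 else acc) := by
      intro acc i hi
      rw [PySem.List.mem_pyRange_one] at hi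
      obtain ⟨h0, hlt⟩ := hi
      obtain ⟨k, rfl⟩ := Int.eq_ofNat_of_zero_le h0
      have hk : k < ((x :: t).zip (x :: t).tail).length := by exact_mod_cast hlt
      have hkc : k < (x :: t).length := by simp at hk ⊢; omega
      have hk1 : k + 1 < (x :: t).length := by simp at hk ⊢; omega
      have hz : PySem.List.pyGetD ((x :: t).zip (x :: t).tail) (k : Int) (' ', ' ')
          = ((x :: t)[k]'hkc, (x :: t)[k+1]'hk1) := by
        rw [PySem.List.pyGetD_natCast]
        simp only [List.tail_cons] at hk ⊢
        rw [List.getD_eq_getElem _ _ hk]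
        simp [List.getElem_zip, List.getElem_cons_succ]
      have h1 : PySem.List.pyGetD (x :: t) (k : Int) ' ' = (x :: t)[k]'hkc := by
        rw [PySem.List.pyGetD_natCast]; simp [List.getElem?_eq_getElem hkc]
      have h2 : PySem.List.pyGetD (x :: t) ((k : Int) + 1) ' ' = (x :: t)[k+1]'hk1 := by
        have hcast : ((k : Int) + 1) = ((k + 1 : Nat) : Int) := by push_cast; ring
        rw [hcast, PySem.List.pyGetD_natCast]; simp [List.getElem?_eq_getElem hk1]
      rw [hz, h1, h2, pvCond_eq]
    rw [PySem.List.foldl_congr_mem _ _ _ _ hcongr]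
    rw [PySem.List.foldl_pyRange_zero_pyGetD' ((x :: t).zip (x :: t).tail) (' ', ' ')
        (fun acc p => if pvValid p.1 && pvValid p.2 then acc + 1 else acc) 0]
    simpa using pvFoldl_eq_pairCnt (x :: t) 0

lemma pvPairCnt_run (rest : List Char) :
    ∀ c : Char, pvValid c = true →
      pvPairCnt (c :: rest)
        = ((rest.takeWhile pvValid).length : Int) + pvPairCnt (rest.dropWhile pvValid) := by
  induction rest with
  | nil => intro c hc; simp [pvPairCnt]
  | cons b t ih =>
    intro c hc
    by_cases hb : pvValid b = true
    · have := ih b hb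
      simp only [pvPairCnt, List.takeWhile_cons, List.dropWhile_cons, hb, hc,
        Bool.and_self, if_true] at this ⊢
      simp [this]; ring
    · simp only [pvPairCnt, List.takeWhile_cons, List.dropWhile_cons,
        hb, hc, Bool.true_and]
      simp

lemma pvPairCnt_eq_runs (cs : List Char) : pvPairCnt cs = pvRuns cs := by
  induction cs using pvRuns.induct with
  | case1 => simp [pvPairCnt, pvRuns]
  | case2 c rest hc ih =>
    rw [pvPairCnt_run rest c hc, pvRuns, if_pos hc, ih]
  | case3 c rest hc ih =>
    rw [pvRuns, if_neg hc, ← ih]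
    cases rest with
    | nil => simp [pvPairCnt]
    | cons b t => simp [pvPairCnt, Bool.and_eq_true] at hc ⊢; simp [hc]

-- ===== VERDICT (by name: the statement is the Claim_ definition above) =====
theorem consecutiveLowerCase_spec : Claim_equal_consecutiveLowerCase := by
  intro password _
  show _ = _
  unfold consecutiveLowerCase consecutiveLowerCase_alt
  simp only []
  rw [pvA_loop_eq, pvPairCnt_append_one, pvPairCnt_eq_runs]
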